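-- pv_equiv track=rewrite | github.com/zhangheng18/LeetCode | python/151.反转字符串中的单词.py | strip_space
-- ===== SOURCE A (Python) =====
-- def strip_space(s):
--     # 移除多余空格
--     start, end = 0, len(s) - 1
--
--     # 移除开头空格
--     while start <= end and s[start] == ' ':
--         start += 1
--
--     # 移除结尾空格
--     while start < end and s[end] == ' ':
--         end -= 1
--     # 移除单词中间多余的空格
--     slow, fast = start, start
--     while fast <= end:
--         if s[fast] != ' ' or s[fast - 1] != ' ':
--             s[slow] = s[fast]
--             slow += 1
--         fast += 1
--     return start, slow
-- ===== SOURCE B (Python) =====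
-- def strip_space(s):
--     n = len(s)
--     start = 0
--     while start < n and s[start] == ' ':
--         start += 1
--     end = n - 1
--     while start < end and s[end] == ' ':
--         end -= 1
--     # split the trimmed segment into words (maximal runs of non-space cells)
--     words, cur = [], []
--     for tok in s[start:end + 1]:
--         if tok == ' ':
--             if cur:
--                 words.append(cur)
--                 cur = []
--         else:
--             cur.append(tok)
--     if cur:
--         words.append(cur)
--     # join the words with single spaces and write back in place
--     collapsed = []
--     for w in words:
--         if collapsed:
--             collapsed.append(' ')
--         collapsed.extend(w)
--     s[start:start + len(collapsed)] = collapsed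
--     return start, start + len(collapsed)
-- ===== Notes on version B (the rewrite author's own statement) =====
-- stated objective: alternative
-- what changed: Replaces A's single two-pointer in-place compaction loop (which reads across its own writes) with a split-into-words / join-with-single-spaces decomposition over the trimmed slice, writing the collapsed cells back with one slice assignment; same return value and same mutation of s.
import Mathlib
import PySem

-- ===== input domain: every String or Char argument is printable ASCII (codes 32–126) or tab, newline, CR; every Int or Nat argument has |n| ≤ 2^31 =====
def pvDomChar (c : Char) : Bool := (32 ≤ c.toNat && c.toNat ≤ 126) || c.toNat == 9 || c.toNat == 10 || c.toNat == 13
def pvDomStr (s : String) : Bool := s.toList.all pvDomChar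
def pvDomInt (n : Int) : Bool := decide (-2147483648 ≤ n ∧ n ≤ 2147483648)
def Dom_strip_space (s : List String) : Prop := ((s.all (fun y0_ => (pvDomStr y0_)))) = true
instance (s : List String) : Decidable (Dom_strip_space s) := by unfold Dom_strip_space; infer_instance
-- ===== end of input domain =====

-- B replaces A's two-pointer in-place compaction with a split-words/join decomposition.
-- Both Pythons mutate s identically; the equivalence proved here is about the return value.

-- ===== PORT A =====
-- while start <= end and s[start] == ' ': start += 1
def stripLeadA (s : List String) (start end_ : Int) : Int :=
  if start ≤ end_ ∧ PySem.List.pyGetD s start "" = " " then stripLeadA s (start + 1) end_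
  else start
termination_by (end_ + 1 - start).toNat
decreasing_by omega

-- while start < end and s[end] == ' ': end -= 1
def stripTrailA (s : List String) (start end_ : Int) : Int :=
  if start < end_ ∧ PySem.List.pyGetD s end_ "" = " " then stripTrailA s start (end_ - 1)
  else end_
termination_by (end_ - start).toNat
decreasing_by omega

-- while fast <= end: if s[fast] != ' ' or s[fast-1] != ' ': s[slow] = s[fast]; slow += 1; fast += 1
-- (the disjunction is evaluated non-lazily; whenever Python skips s[fast-1], the first
--  disjunct is true, so the value of the condition is identical)
def stripLoopA (s : List String) (slow fast end_ : Int) : Int :=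
  if fast ≤ end_ then
    if PySem.List.pyGetD s fast "" ≠ " " ∨ PySem.List.pyGetD s (fast - 1) "" ≠ " " then
      stripLoopA (PySem.List.pySetD s slow (PySem.List.pyGetD s fast "")) (slow + 1) (fast + 1) end_
    else
      stripLoopA s slow (fast + 1) end_
  else slow
termination_by (end_ + 1 - fast).toNat
decreasing_by all_goals omega

def strip_space (s : List String) : Int × Int :=
  let start := stripLeadA s 0 ((s.length : Int) - 1)
  let end_ := stripTrailA s start ((s.length : Int) - 1)
  (start, stripLoopA s start start end_)

-- ===== PORT B =====
-- while start < n and s[start] == ' ': start += 1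
def leadB (s : List String) (n start : Int) : Int :=
  if start < n ∧ PySem.List.pyGetD s start "" = " " then leadB s n (start + 1)
  else start
termination_by (n - start).toNat
decreasing_by omega

-- while start < end and s[end] == ' ': end -= 1
def trailB (s : List String) (start end_ : Int) : Int :=
  if start < end_ ∧ PySem.List.pyGetD s end_ "" = " " then trailB s start (end_ - 1)
  else end_
termination_by (end_ - start).toNat
decreasing_by omega

-- loop body of the word-splitting pass (state = (words, cur))
def groupB (st : List (List String) × List String) (tok : String) :
    List (List String) × List String :=
  if tok = " " then (if st.2 ≠ [] then (st.1 ++ [st.2], []) else st)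
  else (st.1, st.2 ++ [tok])

-- loop body of the joining pass (state = collapsed)
def joinB (collapsed : List String) (w : List String) : List String :=
  (if collapsed ≠ [] then collapsed ++ [" "] else collapsed) ++ w

def strip_space_alt (s : List String) : Int × Int :=
  let n : Int := s.length
  let start := leadB s n 0
  let end_ := trailB s start (n - 1)
  let st := (PySem.List.slice s (some start) (some (end_ + 1))).foldl groupB ([], [])
  let words := if st.2 ≠ [] then st.1 ++ [st.2] else st.1
  let collapsed := words.foldl joinB []
  (start, start + (collapsed.length : Int))

-- ===== PRECONDITION & SPEC =====
def Spec_strip_space (s : List String) (out : Int × Int) : Prop := out = strip_space_alt s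
instance (s : List String) (out : Int × Int) : Decidable (Spec_strip_space s out) := by unfold Spec_strip_space; infer_instance

-- ===== CLAIM (what is proved, stated in full; the proofs are below) =====
def Claim_equal_strip_space : Prop := ∀ (s : List String), Dom_strip_space s → Spec_strip_space s (strip_space s)


-- ===== LEMMAS AND PROOFS =====

-- spec count: number of cells A's compaction keeps, over the original segment;
-- the Bool argument records whether the previous cell was " "
def kcN : Bool → List String → Nat
  | _, [] => 0
  | sp, x :: xs => (if x ≠ " " ∨ sp = false then 1 else 0) + kcN (decide (x = " ")) xs

-- the segment s[a..b] read cell by cell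
def segI (s : List String) (a b : Int) : List String :=
  (PySem.List.pyRange a (b + 1) 1).map (fun i => PySem.List.pyGetD s i "")

-- total size of a word list counting one separator slot per word
def SW (ws : List (List String)) : Nat := (ws.map (fun w => w.length + 1)).sum

-- final flush of the word-splitting state
def FW (st : List (List String) × List String) : List (List String) :=
  if st.2 ≠ [] then st.1 ++ [st.2] else st.1

theorem lead_eq (s : List String) (e start : Int) :
    stripLeadA s start e = leadB s (e + 1) start := by
  rw [stripLeadA, leadB]
  by_cases h : start ≤ e ∧ PySem.List.pyGetD s start "" = " "
  · rw [if_pos h, if_pos ⟨by omega, h.2⟩, lead_eq]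
  · have h' : ¬ (start < e + 1 ∧ PySem.List.pyGetD s start "" = " ") := by
      intro hc; exact h ⟨by omega, hc.2⟩
    rw [if_neg h, if_neg h']
termination_by (e + 1 - start).toNat
decreasing_by omega

theorem trail_eq (s : List String) (start e : Int) :
    stripTrailA s start e = trailB s start e := by
  rw [stripTrailA, trailB]
  by_cases h : start < e ∧ PySem.List.pyGetD s e "" = " "
  · rw [if_pos h, if_pos h, trail_eq]
  · rw [if_neg h, if_neg h]
termination_by (e - start).toNat
decreasing_by omega

theorem lead_ge (s : List String) (e start : Int) : start ≤ stripLeadA s start e := by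
  rw [stripLeadA]
  by_cases h : start ≤ e ∧ PySem.List.pyGetD s start "" = " "
  · rw [if_pos h]; have := lead_ge s e (start + 1); omega
  · rw [if_neg h]
termination_by (e + 1 - start).toNat
decreasing_by omega

theorem lead_stop (s : List String) (e start : Int) (h : stripLeadA s start e ≤ e) :
    PySem.List.pyGetD s (stripLeadA s start e) "" ≠ " " := by
  rw [stripLeadA] at *
  by_cases hc : start ≤ e ∧ PySem.List.pyGetD s start "" = " "
  · rw [if_pos hc] at *; exact lead_stop s e (start + 1) h
  · rw [if_neg hc] at *
    intro hsp
    exact hc ⟨h, hsp⟩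
termination_by (e + 1 - start).toNat
decreasing_by omega

theorem trail_le (s : List String) (start e : Int) : stripTrailA s start e ≤ e := by
  rw [stripTrailA]
  by_cases h : start < e ∧ PySem.List.pyGetD s e "" = " "
  · rw [if_pos h]; have := trail_le s start (e - 1); omega
  · rw [if_neg h]
termination_by (e - start).toNat
decreasing_by omega

theorem trail_ge (s : List String) (start e : Int) : min start e ≤ stripTrailA s start e := by
  rw [stripTrailA]
  by_cases h : start < e ∧ PySem.List.pyGetD s e "" = " "
  · rw [if_pos h]; have := trail_ge s start (e - 1); omega
  · rw [if_neg h]; omega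
termination_by (e - start).toNat
decreasing_by omega

theorem trail_stop (s : List String) (start e : Int)
    (h : start < stripTrailA s start e) :
    PySem.List.pyGetD s (stripTrailA s start e) "" ≠ " " := by
  rw [stripTrailA] at *
  by_cases hc : start < e ∧ PySem.List.pyGetD s e "" = " "
  · rw [if_pos hc] at *; exact trail_stop s start (e - 1) h
  · rw [if_neg hc] at *
    intro hsp
    exact hc ⟨h, hsp⟩
termination_by (e - start).toNat
decreasing_by omega

theorem segI_nil (s : List String) (a b : Int) (h : b < a) : segI s a b = [] := by
  unfold segI
  rw [PySem.List.pyRange_one_eq_nil (by omega)]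
  rfl

theorem segI_cons (s : List String) (a b : Int) (h : a ≤ b) :
    segI s a b = PySem.List.pyGetD s a "" :: segI s (a + 1) b := by
  unfold segI
  rw [PySem.List.pyRange_one_cons (by omega)]
  rfl

theorem segI_last (s : List String) (a b : Int) (h : a ≤ b) :
    (segI s a b).getLast? = some (PySem.List.pyGetD s b "") := by
  unfold segI
  rw [show b + 1 = (b) + 1 from rfl, PySem.List.pyRange_one_succ_right (by omega)]
  simp

theorem last?_cons_ne {α : Type} (x : α) (xs : List α) (h : xs ≠ []) :
    (x :: xs).getLast? = xs.getLast? := by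
  cases xs with
  | nil => exact absurd rfl h
  | cons y ys => simp [List.getLast?_cons_cons]

theorem segI_slice (s : List String) (a b : Int) (ha : 0 ≤ a) (hb1 : -1 ≤ b)
    (hb : b < (s.length : Int)) :
    segI s a b = PySem.List.slice s (some a) (some (b + 1)) := by
  by_cases h : a ≤ b
  · rw [segI_cons s a b h, PySem.List.slice_toNat s (by omega) (by omega)]
    have halen : a.toNat < s.length := by omega
    rw [List.drop_eq_getElem_cons halen]
    have hk : (b + 1).toNat - a.toNat = ((b + 1).toNat - (a + 1).toNat) + 1 := by omega
    rw [hk, List.take_succ_cons]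
    have hx : PySem.List.pyGetD s a "" = s[a.toNat] :=
      PySem.List.pyGetD_eq_getElem s "" ha (by omega)
    rw [hx, segI_slice s (a + 1) b (by omega) hb1 hb,
        PySem.List.slice_toNat s (by omega) (by omega)]
    have : (a + 1).toNat = a.toNat + 1 := by omega
    rw [this]
  · rw [segI_nil s a b (by omega), PySem.List.slice_toNat s ha (by omega)]
    have : (b + 1).toNat - a.toNat = 0 := by omega
    rw [this, List.take_zero]
termination_by (b + 1 - a).toNat
decreasing_by omega

theorem loopA_eq (s : List String) (end_ : Int) (s' : List String) (slow fast : Int)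
    (hlen : s'.length = s.length) (h0 : 0 ≤ slow) (h1 : slow ≤ fast)
    (hend : end_ < (s.length : Int))
    (hag : ∀ i : Int, slow ≤ i → i < (s.length : Int) → PySem.List.pyGetD s' i "" = PySem.List.pyGetD s i "")
    (heq : slow = fast → s' = s) :
    stripLoopA s' slow fast end_ =
      slow + (kcN (decide (PySem.List.pyGetD s' (fast - 1) "" = " ")) (segI s fast end_) : Int) := by
  rw [stripLoopA]
  by_cases hf : fast ≤ end_
  · have hfl : fast < (s.length : Int) := by omega
    have hx : PySem.List.pyGetD s' fast "" = PySem.List.pyGetD s fast "" := hag fast h1 hfl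
    rw [if_pos hf, segI_cons s fast end_ hf]
    by_cases hc : PySem.List.pyGetD s' fast "" ≠ " " ∨ PySem.List.pyGetD s' (fast - 1) "" ≠ " "
    · rw [if_pos hc]
      have hlen'' : (PySem.List.pySetD s' slow (PySem.List.pyGetD s' fast "")).length = s.length := by
        rw [PySem.List.pySetD_of_nonneg s' _ h0, List.length_set, hlen]
      have hsetne : ∀ i : Int, slow < i → i < (s.length : Int) →
          PySem.List.pyGetD (PySem.List.pySetD s' slow (PySem.List.pyGetD s' fast "")) i "" =
            PySem.List.pyGetD s' i "" := by
        intro i hi hil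
        rw [PySem.List.pySetD_of_nonneg s' _ h0,
            PySem.List.pyGetD_eq_getElem _ "" (by omega) (by rw [List.length_set, hlen]; omega),
            List.getElem_set_ne (by omega)]
        exact (PySem.List.pyGetD_eq_getElem s' "" (by omega) (by omega)).symm
      have hself : slow = fast → PySem.List.pySetD s' slow (PySem.List.pyGetD s' fast "") = s := by
        intro h; subst h
        rw [heq rfl, PySem.List.pySetD_of_nonneg s _ h0,
            PySem.List.pyGetD_eq_getElem s "" h0 (by omega), List.set_getElem_self]
      have hag'' : ∀ i : Int, slow + 1 ≤ i → i < (s.length : Int) →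
          PySem.List.pyGetD (PySem.List.pySetD s' slow (PySem.List.pyGetD s' fast "")) i "" =
            PySem.List.pyGetD s i "" := by
        intro i hi hil
        rw [hsetne i (by omega) hil]
        exact hag i (by omega) hil
      have heq'' : slow + 1 = fast + 1 → PySem.List.pySetD s' slow (PySem.List.pyGetD s' fast "") = s := by
        intro h; exact hself (by omega)
      rw [loopA_eq s end_ _ (slow + 1) (fast + 1) hlen'' (by omega) (by omega) hend hag'' heq'']
      have hflag : PySem.List.pyGetD (PySem.List.pySetD s' slow (PySem.List.pyGetD s' fast "")) (fast + 1 - 1) "" =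
          PySem.List.pyGetD s fast "" := by
        have : fast + 1 - 1 = fast := by omega
        rw [this]
        by_cases hsf : slow = fast
        · rw [hself hsf]
        · rw [hsetne fast (by omega) hfl]; exact hx
      rw [hflag]
      have hcond : PySem.List.pyGetD s fast "" ≠ " " ∨
          decide (PySem.List.pyGetD s' (fast - 1) "" = " ") = false := by
        rcases hc with hc | hc
        · exact Or.inl (hx ▸ hc)
        · exact Or.inr (decide_eq_false hc)
      simp only [kcN]
      rw [if_pos hcond]
      push_cast
      ring
    · rw [if_neg hc]
      push Not at hc
      obtain ⟨hc1, hc2⟩ := hc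
      rw [loopA_eq s end_ s' slow (fast + 1) hlen h0 (by omega) hend hag (by intro h; omega)]
      have hft : fast + 1 - 1 = fast := by omega
      rw [hft]
      simp only [kcN]
      rw [if_neg (by simp [← hx, hc1, hc2])]
      rw [← hx]
      norm_num
  · rw [if_neg hf, segI_nil s fast end_ (by omega), kcN]
    simp
termination_by (end_ + 1 - fast).toNat
decreasing_by all_goals omega

theorem SL (t : List String) (ws : List (List String)) (cur : List String)
    (hne : t ≠ []) (hlast : t.getLast? ≠ some " ") :
    SW (FW (t.foldl groupB (ws, cur))) =
      SW ws + cur.length + 1 + kcN (decide (cur = [])) t := by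
  induction t generalizing ws cur with
  | nil => exact absurd rfl hne
  | cons x xs ih =>
    simp only [List.foldl_cons]
    by_cases hx : x = " "
    · subst hx
      have hxs : xs ≠ [] := by
        intro h; subst h; simp at hlast
      have hlast' : xs.getLast? ≠ some " " := by
        rwa [last?_cons_ne _ _ hxs] at hlast
      by_cases hc : cur = []
      · subst hc
        have hg : groupB (ws, ([] : List String)) " " = (ws, []) := by simp [groupB]
        rw [hg, ih ws [] hxs hlast']
        simp [kcN]
      · have hg : groupB (ws, cur) " " = (ws ++ [cur], []) := by simp [groupB, hc]
        rw [hg, ih (ws ++ [cur]) [] hxs hlast']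
        simp [kcN, SW, hc]
        omega
    · have hg : groupB (ws, cur) x = (ws, cur ++ [x]) := by simp [groupB, hx]
      rw [hg]
      by_cases hxs : xs = []
      · subst hxs
        simp only [List.foldl_nil]
        have hfw : FW (ws, cur ++ [x]) = ws ++ [cur ++ [x]] := by simp [FW]
        rw [hfw]
        simp [SW, kcN, hx]
        omega
      · have hlast' : xs.getLast? ≠ some " " := by
          rwa [last?_cons_ne _ _ hxs] at hlast
        rw [ih ws (cur ++ [x]) hxs hlast']
        simp [kcN, hx]
        omega

theorem NE (t : List String) (ws : List (List String)) (cur : List String)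
    (hws : ∀ w ∈ ws, w ≠ []) :
    ∀ w ∈ FW (t.foldl groupB (ws, cur)), w ≠ [] := by
  induction t generalizing ws cur with
  | nil =>
    intro w hw
    unfold FW at hw
    split at hw
    · rcases List.mem_append.mp hw with h | h
      · exact hws w h
      · simp at h; subst h; assumption
    · exact hws w hw
  | cons x xs ih =>
    simp only [List.foldl_cons]
    unfold groupB
    split
    · split
      · refine ih (ws ++ [cur]) [] ?_
        intro w hw
        rcases List.mem_append.mp hw with h | h
        · exact hws w h
        · simp at h; subst h; assumption
      · exact ih ws cur hws
    · exact ih ws (cur ++ [x]) hws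

theorem JL_ne (words : List (List String)) (acc : List String) (hacc : acc ≠ []) :
    (words.foldl joinB acc).length = acc.length + SW words := by
  induction words generalizing acc with
  | nil => simp [SW]
  | cons w ws ih =>
    have hj : joinB acc w = acc ++ [" "] ++ w := by simp [joinB, hacc]
    simp only [List.foldl_cons, hj]
    rw [ih _ (by simp)]
    simp [SW]
    omega

theorem JL0 (words : List (List String)) (hw : ∀ w ∈ words, w ≠ []) :
    (words.foldl joinB []).length = SW words - 1 := by
  cases words with
  | nil => simp [SW]
  | cons w ws =>
    have hw0 : w ≠ [] := hw w (by simp)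
    have hj : joinB [] w = w := by simp [joinB]
    simp only [List.foldl_cons, hj]
    rw [JL_ne ws w hw0]
    simp [SW]

theorem kcN_head_ne (b : Bool) (x : String) (xs : List String) (hx : x ≠ " ") :
    kcN b (x :: xs) = 1 + kcN false xs := by
  simp [kcN, hx]

theorem strip_space_eq (s : List String) : strip_space s = strip_space_alt s := by
  simp only [strip_space, strip_space_alt]
  have hlead : leadB s (s.length : Int) 0 = stripLeadA s 0 ((s.length : Int) - 1) := by
    have h := lead_eq s ((s.length : Int) - 1) 0
    rw [sub_add_cancel] at h
    exact h.symm
  rw [hlead, ← trail_eq]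
  set start := stripLeadA s 0 ((s.length : Int) - 1) with hstartdef
  set end_ := stripTrailA s start ((s.length : Int) - 1) with henddef
  have h0s : (0 : Int) ≤ start := lead_ge s ((s.length : Int) - 1) 0
  have hEle : end_ ≤ (s.length : Int) - 1 := trail_le s start ((s.length : Int) - 1)
  have hEge : (-1 : Int) ≤ end_ := by
    have h1 := trail_ge s start ((s.length : Int) - 1)
    have h2 : (0 : Int) ≤ (s.length : Int) := Int.natCast_nonneg _
    omega
  have hA : stripLoopA s start start end_ =
      start + (kcN (decide (PySem.List.pyGetD s (start - 1) "" = " ")) (segI s start end_) : Int) :=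
    loopA_eq s end_ s start start rfl h0s le_rfl (by omega) (fun i _ _ => rfl) (fun _ => rfl)
  have hslice : PySem.List.slice s (some start) (some (end_ + 1)) = segI s start end_ :=
    (segI_slice s start end_ h0s hEge (by omega)).symm
  rw [hA, hslice]
  simp only [Prod.mk.injEq]
  refine ⟨trivial, ?_⟩
  by_cases hse : start ≤ end_
  · have hhead : PySem.List.pyGetD s start "" ≠ " " :=
      lead_stop s ((s.length : Int) - 1) 0 (by omega)
    have hlastne : PySem.List.pyGetD s end_ "" ≠ " " := by
      rcases lt_or_eq_of_le hse with h | h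
      · exact trail_stop s start ((s.length : Int) - 1) h
      · rw [← h]; exact hhead
    have ht : segI s start end_ = PySem.List.pyGetD s start "" :: segI s (start + 1) end_ :=
      segI_cons s start end_ hse
    have htne : segI s start end_ ≠ [] := by rw [ht]; simp
    have hlast? : (segI s start end_).getLast? ≠ some " " := by
      rw [segI_last s start end_ hse]
      simp [hlastne]
    have hNE := NE (segI s start end_) [] [] (by simp)
    have hJ := JL0 (FW ((segI s start end_).foldl groupB ([], []))) hNE
    have hSL' : SW (FW ((segI s start end_).foldl groupB ([], []))) =
        1 + kcN true (segI s start end_) := by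
      have hSL := SL (segI s start end_) [] [] htne hlast?
      simpa [SW] using hSL
    have hfw : (if ((segI s start end_).foldl groupB (([], []) : List (List String) × List String)).2 ≠ [] then
          ((segI s start end_).foldl groupB ([], [])).1 ++ [((segI s start end_).foldl groupB ([], [])).2]
        else ((segI s start end_).foldl groupB ([], [])).1) =
        FW ((segI s start end_).foldl groupB ([], [])) := rfl
    rw [hfw, hJ, hSL']
    have hkc : ∀ b : Bool, kcN b (segI s start end_) = 1 + kcN false (segI s (start + 1) end_) := by
      intro b
      rw [ht]
      exact kcN_head_ne b _ _ hhead
    rw [hkc (decide (PySem.List.pyGetD s (start - 1) "" = " ")), hkc true]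
    omega
  · have hnil : segI s start end_ = [] := segI_nil s start end_ (by omega)
    rw [hnil]
    simp [kcN]

-- ===== VERDICT (by name: the statement is the Claim_ definition above) =====
theorem strip_space_spec : Claim_equal_strip_space := by
  unfold Claim_equal_strip_space
  intro s _
  unfold Spec_strip_space
  exact strip_space_eq s
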